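-- pv_equiv track=rewrite | github.com/Keytoyze/JumpCoder | jumpcoder/language_spec/cpp.py | is_in_comment
-- ===== SOURCE A (Python) =====
-- from typing import List, Tuple
--
-- def is_in_comment(code_lines: List[str], index: int) -> bool:
--     in_block_comment = False
--     for i, line in enumerate(code_lines):
--         if '/*' in line:
--             in_block_comment = True
--         if i == index:
--             return line.lstrip().startswith("//") or in_block_comment
--         if '*/' in line:
--             in_block_comment = False
--     return False
-- ===== SOURCE B (Python) =====
-- def is_in_comment(code_lines, index):
--     if index < 0 or index >= len(code_lines):
--         return False
--     in_block = False
--     for line in reversed(code_lines[:index]):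
--         if '/*' in line or '*/' in line:
--             in_block = '/*' in line and '*/' not in line
--             break
--     line = code_lines[index]
--     if '/*' in line:
--         in_block = True
--     return line.lstrip().startswith('//') or in_block
-- ===== Notes on version B (the rewrite author's own statement) =====
-- stated objective: simpler
-- what changed: Instead of simulating the block-comment state machine forward with an enumerate counter and early return, B bounds-checks the index, finds the nearest preceding line containing a comment marker by a single reverse scan of the prefix to read off the block state, then examines the target line alone.
import Mathlib
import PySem

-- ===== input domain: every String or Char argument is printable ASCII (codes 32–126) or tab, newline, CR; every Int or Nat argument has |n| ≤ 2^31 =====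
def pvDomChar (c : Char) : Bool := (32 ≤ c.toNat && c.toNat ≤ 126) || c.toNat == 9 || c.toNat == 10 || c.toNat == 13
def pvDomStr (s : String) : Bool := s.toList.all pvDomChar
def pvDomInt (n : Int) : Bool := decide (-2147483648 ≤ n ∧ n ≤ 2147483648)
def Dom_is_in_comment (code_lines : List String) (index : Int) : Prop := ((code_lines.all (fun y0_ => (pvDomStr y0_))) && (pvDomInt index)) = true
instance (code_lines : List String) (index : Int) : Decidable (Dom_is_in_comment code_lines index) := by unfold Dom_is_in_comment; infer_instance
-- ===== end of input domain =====

-- B replaces A's forward state-machine scan with a bounds check, a reverse search of the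
-- prefix for the nearest comment marker, and a separate look at the target line (simpler).

-- ===== PORT A =====
-- the 'for i, line in enumerate(code_lines)' loop with its early return
def isInCommentLoopA (ls : List String) (i : Nat) (index : Int) (inb : Bool) : Bool :=
  match ls with
  | [] => false
  | line :: rest =>
    let inb := if PySem.Str.isIn "/*" line then true else inb
    if (i : Int) == index then
      PySem.Str.startswith (PySem.Str.lstrip line) "//" || inb
    else
      isInCommentLoopA rest (i + 1) index (if PySem.Str.isIn "*/" line then false else inb)

def is_in_comment (code_lines : List String) (index : Int) : Bool :=
  isInCommentLoopA code_lines 0 index false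

-- ===== PORT B =====
def pvHasMark (l : String) : Bool := PySem.Str.isIn "/*" l || PySem.Str.isIn "*/" l
def pvBlockVal (l : String) : Bool := PySem.Str.isIn "/*" l && !(PySem.Str.isIn "*/" l)

def is_in_comment_alt (code_lines : List String) (index : Int) : Bool :=
  if index < 0 ∨ (code_lines.length : Int) ≤ index then false
  else
    let k := index.toNat
    -- 'for line in reversed(code_lines[:index]): if marker: …; break' = find? on the reversed prefix
    let in_block :=
      match ((code_lines.take k).reverse).find? pvHasMark with
      | some l => pvBlockVal l
      | none => false
    let line := (PySem.List.pyGet? code_lines index).getD ""   -- in range by the guard above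
    let in_block := if PySem.Str.isIn "/*" line then true else in_block
    PySem.Str.startswith (PySem.Str.lstrip line) "//" || in_block

-- ===== PRECONDITION & SPEC =====
def Spec_is_in_comment (code_lines : List String) (index : Int) (out : Bool) : Prop := out = is_in_comment_alt code_lines index
instance (code_lines : List String) (index : Int) (out : Bool) : Decidable (Spec_is_in_comment code_lines index out) := by unfold Spec_is_in_comment; infer_instance

-- ===== CLAIM (what is proved, stated in full; the proofs are below) =====
def Claim_equal_is_in_comment : Prop := ∀ (code_lines : List String) (index : Int), Dom_is_in_comment code_lines index → Spec_is_in_comment code_lines index (is_in_comment code_lines index)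

-- ===== LEMMAS AND PROOFS =====

-- closed-form characterisation of A's loop, for any counter value and carried state
theorem loopA_eq (ls : List String) (i : Nat) (index : Int) (inb : Bool) :
    isInCommentLoopA ls i index inb =
      if index < (i : Int) ∨ ((i : Int) + ls.length ≤ index) then false
      else
        let k := (index - i).toNat
        let line := ls.getD k ""
        PySem.Str.startswith (PySem.Str.lstrip line) "//" ||
          (if PySem.Str.isIn "/*" line then true
           else match ((ls.take k).reverse).find? pvHasMark with
                | some l => pvBlockVal l
                | none => inb) := by
  induction ls generalizing i inb with
  | nil =>
    have h : index < (i : Int) ∨ ((i : Int) + ([] : List String).length ≤ index) := by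
      simp; omega
    rw [if_pos h]; rfl
  | cons l rest ih =>
    by_cases hi : (i : Int) = index
    · have hcond : ¬ (index < (i : Int) ∨ ((i : Int) + ((l :: rest).length : Nat) ≤ index)) := by
        simp only [List.length_cons]; push_cast; omega
      rw [if_neg hcond]
      have hk : (index - i).toNat = 0 := by omega
      have hbeq : ((i : Int) == index) = true := beq_iff_eq.mpr hi
      simp only [isInCommentLoopA, hbeq, if_true, hk, List.take_zero, List.reverse_nil,
        List.find?_nil, List.getD_cons_zero]
    · have hbeq : ((i : Int) == index) = false := by
        rw [beq_eq_false_iff_ne]; exact hi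
      rw [isInCommentLoopA]
      simp only [hbeq, Bool.false_eq_true, if_false]
      rw [ih]
      by_cases hout : index < (i : Int) ∨ ((i : Int) + ((l :: rest).length : Nat) ≤ index)
      · have hout' : index < ((i + 1 : Nat) : Int) ∨ (((i + 1 : Nat) : Int) + (rest.length : Nat) ≤ index) := by
          simp only [List.length_cons] at hout; push_cast at hout ⊢; omega
        rw [if_pos hout, if_pos hout']
      · have hout' : ¬ (index < ((i + 1 : Nat) : Int) ∨ (((i + 1 : Nat) : Int) + (rest.length : Nat) ≤ index)) := by
          simp only [List.length_cons] at hout; push_cast at hout ⊢; omega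
        rw [if_neg hout, if_neg hout']
        have hklt : 0 < index - i := by omega
        have hk1 : (index - ((i : Nat) + 1 : Nat)).toNat = (index - i).toNat - 1 := by push_cast; omega
        have hkpos : (index - i).toNat = ((index - i).toNat - 1) + 1 := by omega
        simp only [hk1]
        set m := (index - i).toNat - 1 with hm
        have htake : (l :: rest).take (index - (i : Int)).toNat = l :: rest.take m := by
          rw [hkpos]; rfl
        have hget : (l :: rest).getD (index - (i : Int)).toNat "" = rest.getD m "" := by
          rw [hkpos]; rfl
        simp only [htake, hget, List.reverse_cons, List.find?_append]
        cases hfind : (rest.take m).reverse.find? pvHasMark with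
        | some x => rfl
        | none =>
          simp only [List.find?_cons, List.find?_nil]
          by_cases h1 : PySem.Chars.isIn ['/', '*'] l.toList = true <;>
            by_cases h2 : PySem.Chars.isIn ['*', '/'] l.toList = true <;>
              simp [pvHasMark, pvBlockVal, h1, h2]

-- ===== VERDICT (by name: the statement is the Claim_ definition above) =====
theorem is_in_comment_spec : Claim_equal_is_in_comment := by
  intro ls index _
  unfold Spec_is_in_comment is_in_comment is_in_comment_alt
  rw [loopA_eq]
  by_cases hout : index < 0 ∨ ((ls.length : Int) ≤ index)
  · have hA : index < ((0 : Nat) : Int) ∨ (((0 : Nat) : Int) + (ls.length : Nat) ≤ index) := by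
      push_cast; omega
    rw [if_pos hA, if_pos hout]
  · have hA : ¬ (index < ((0 : Nat) : Int) ∨ (((0 : Nat) : Int) + (ls.length : Nat) ≤ index)) := by
      push_cast at hout ⊢; omega
    rw [if_neg hA, if_neg hout]
    have h0 : (0 : Int) ≤ index := by omega
    have hsub : index - ((0 : Nat) : Int) = index := by push_cast; omega
    simp only [hsub, PySem.List.pyGet?_of_nonneg ls h0, List.getD_eq_getElem?_getD]
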